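-- pv_equiv track=rewrite | github.com/justslee/scorecard | backend/app/caddie/club_selection.py | select_club
-- ===== SOURCE A (Python) =====
-- DEFAULT_CLUB_DISTANCES: dict[str, int] = {
--     "driver": 250,
--     "3wood": 230,
--     "5wood": 215,
--     "hybrid": 200,
--     "4iron": 190,
--     "5iron": 180,
--     "6iron": 170,
--     "7iron": 160,
--     "8iron": 150,
--     "9iron": 140,
--     "pw": 130,
--     "gw": 115,
--     "sw": 100,
--     "lw": 85,
-- }
--
-- def select_club(
--     target_yards: int,
--     club_distances: dict[str, int],
--     bias: str = "moderate",
-- ) -> tuple[str, int]: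
--     """Select the best club for a target distance.
--
--     Args:
--         target_yards: Adjusted distance to play
--         club_distances: Player's club distances
--         bias: 'conservative' (club up), 'moderate', 'aggressive' (club down)
--
--     Returns:
--         (club_name, club_distance)
--     """
--     distances = club_distances or DEFAULT_CLUB_DISTANCES
--
--     # Sort clubs by distance descending
--     clubs = sorted(distances.items(), key=lambda x: x[1], reverse=True)
--     if not clubs:
--         return ("7iron", 160)
--
--     # DECADE principle: most amateurs miss short, so favor one more club
--     bias_yards = 0
--     if bias == "conservative":
--         bias_yards = 5
--     elif bias == "aggressive":
--         bias_yards = -5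
--
--     target_with_bias = target_yards + bias_yards
--
--     best_club = clubs[-1]  # shortest club as default
--     for club, dist in clubs:
--         if dist <= target_with_bias + 8:
--             best_club = (club, dist)
--             break
--
--     return best_club
-- ===== SOURCE B (Python) =====
-- DEFAULT_CLUB_DISTANCES: dict[str, int] = {
--     "driver": 250,
--     "3wood": 230,
--     "5wood": 215,
--     "hybrid": 200,
--     "4iron": 190,
--     "5iron": 180,
--     "6iron": 170,
--     "7iron": 160,
--     "8iron": 150,
--     "9iron": 140,
--     "pw": 130,
--     "gw": 115,
--     "sw": 100,
--     "lw": 85,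
-- }
--
-- def select_club(
--     target_yards: int,
--     club_distances: dict[str, int],
--     bias: str = "moderate",
-- ) -> tuple[str, int]:
--     """Single pass, no sorting: track the longest club within threshold
--     (earliest insertion wins ties) and the shortest club as fallback
--     (last insertion wins ties)."""
--     distances = club_distances or DEFAULT_CLUB_DISTANCES
--     bias_yards = 5 if bias == "conservative" else (-5 if bias == "aggressive" else 0)
--     threshold = target_yards + bias_yards + 8
--     best = None
--     fallback = None
--     for club, dist in distances.items():
--         if fallback is None or dist <= fallback[1]:
--             fallback = (club, dist)
--         if dist <= threshold and (best is None or best[1] < dist):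
--             best = (club, dist)
--     if best is not None:
--         return best
--     if fallback is not None:
--         return fallback
--     return ("7iron", 160)
-- ===== Notes on version B (the rewrite author's own statement) =====
-- stated objective: faster
-- what changed: Replaces the sort-then-scan (stable descending sort followed by a linear search plus clubs[-1] fallback) with a single unsorted pass over the dict that maintains the best qualifying club and the minimum-distance fallback.
import Mathlib
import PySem

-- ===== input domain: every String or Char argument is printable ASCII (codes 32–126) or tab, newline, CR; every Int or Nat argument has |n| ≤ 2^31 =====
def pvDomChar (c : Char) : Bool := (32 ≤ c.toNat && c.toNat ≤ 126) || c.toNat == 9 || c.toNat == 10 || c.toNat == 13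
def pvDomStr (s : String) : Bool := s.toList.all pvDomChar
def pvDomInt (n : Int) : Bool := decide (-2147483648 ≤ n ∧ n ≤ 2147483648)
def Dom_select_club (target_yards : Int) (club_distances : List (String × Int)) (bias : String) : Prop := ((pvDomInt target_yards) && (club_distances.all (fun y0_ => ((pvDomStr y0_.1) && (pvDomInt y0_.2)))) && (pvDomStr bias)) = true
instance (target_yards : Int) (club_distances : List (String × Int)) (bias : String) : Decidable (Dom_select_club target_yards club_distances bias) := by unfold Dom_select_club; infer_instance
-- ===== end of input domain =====

-- B replaces A's sort-then-scan by a single unsorted pass (best qualifying club + min fallback).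

-- ===== PORT A =====
def pvDefaultClubs : List (String × Int) :=
  [("driver", 250), ("3wood", 230), ("5wood", 215), ("hybrid", 200), ("4iron", 190),
   ("5iron", 180), ("6iron", 170), ("7iron", 160), ("8iron", 150), ("9iron", 140),
   ("pw", 130), ("gw", 115), ("sw", 100), ("lw", 85)]

def select_club (target_yards : Int) (club_distances : List (String × Int)) (bias : String) : String × Int :=
  let distances := if club_distances = [] then pvDefaultClubs else club_distances
  let clubs := PySem.List.sorted distances (fun x => x.2) true
  if clubs = [] then ("7iron", 160)
  else
    let bias_yards : Int := if bias = "conservative" then 5 else if bias = "aggressive" then (-5) else 0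
    let target_with_bias := target_yards + bias_yards
    let best_club := PySem.List.pyGetD clubs (-1) ("7iron", 160)  -- clubs[-1]
    -- the for-loop with break: first club whose distance fits
    match clubs.find? (fun p => p.2 ≤ target_with_bias + 8) with
    | some p => p
    | none => best_club

-- ===== PORT B =====
-- one iteration of B's single pass: update (best, fallback)
def pvStep (threshold : Int) (s : Option (String × Int) × Option (String × Int))
    (cd : String × Int) : Option (String × Int) × Option (String × Int) :=
  let bst := if cd.2 ≤ threshold then
      match s.1 with
      | none => some cd
      | some b => if b.2 < cd.2 then some cd else some b
    else s.1
  let fb := match s.2 with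
    | none => some cd
    | some f => if cd.2 ≤ f.2 then some cd else some f
  (bst, fb)

def select_club_alt (target_yards : Int) (club_distances : List (String × Int)) (bias : String) : String × Int :=
  let distances := if club_distances = [] then pvDefaultClubs else club_distances
  let bias_yards : Int := if bias = "conservative" then 5 else if bias = "aggressive" then (-5) else 0
  let threshold := target_yards + bias_yards + 8
  let st := distances.foldl (pvStep threshold) (none, none)
  match st.1 with
  | some b => b
  | none =>
    match st.2 with
    | some f => f
    | none => ("7iron", 160)

-- ===== PRECONDITION & SPEC =====
def Spec_select_club (target_yards : Int) (club_distances : List (String × Int)) (bias : String) (out : String × Int) : Prop := out = select_club_alt target_yards club_distances bias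
instance (target_yards : Int) (club_distances : List (String × Int)) (bias : String) (out : String × Int) : Decidable (Spec_select_club target_yards club_distances bias out) := by unfold Spec_select_club; infer_instance

-- ===== CLAIM (what is proved, stated in full; the proofs are below) =====
def Claim_equal_select_club : Prop := ∀ (target_yards : Int) (club_distances : List (String × Int)) (bias : String), Dom_select_club target_yards club_distances bias → Spec_select_club target_yards club_distances bias (select_club target_yards club_distances bias)

-- ===== LEMMAS AND PROOFS =====

-- stable descending insertion keeps / becomes the last element exactly as B's fallback update does
lemma pv_insert_last (x : String × Int) (S : List (String × Int))
    (hS : S.Pairwise (fun a b => b.2 ≤ a.2)) :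
    (PySem.List.insertBy (fun a b => decide (b.2 < a.2)) x S).getLast? =
      (match S.getLast? with
       | none => some x
       | some f => if x.2 ≤ f.2 then some x else some f) := by
  induction S with
  | nil => simp [PySem.List.insertBy]
  | cons y ys ih =>
    rw [List.pairwise_cons] at hS
    by_cases hy : y.2 < x.2
    · have hins : PySem.List.insertBy (fun a b => decide (b.2 < a.2)) x (y :: ys) = x :: y :: ys := by
        simp [PySem.List.insertBy, hy]
      have hlast : ∀ f, (y :: ys).getLast? = some f → f.2 < x.2 := by
        intro f hf
        rcases List.mem_cons.mp (List.mem_of_getLast? hf) with h | h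
        · exact h ▸ hy
        · exact lt_of_le_of_lt (hS.1 f h) hy
      rcases h : (y :: ys).getLast? with _ | ⟨f⟩
      · simp at h
      · rw [hins, List.getLast?_cons_cons, h]
        simp [not_le.mpr (hlast f h)]
    · have hins : PySem.List.insertBy (fun a b => decide (b.2 < a.2)) x (y :: ys) =
          y :: PySem.List.insertBy (fun a b => decide (b.2 < a.2)) x ys := by
        simp [PySem.List.insertBy, hy]
      rw [hins]
      cases ys with
      | nil =>
        simp [PySem.List.insertBy, List.getLast?_cons_cons, not_lt.mp hy]
      | cons z zs =>
        obtain ⟨w, ws, hw⟩ : ∃ w ws, PySem.List.insertBy (fun a b => decide (b.2 < a.2)) x (z :: zs) = w :: ws := by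
          by_cases hz : z.2 < x.2 <;> simp [PySem.List.insertBy, hz]
        rw [hw, List.getLast?_cons_cons, ← hw, ih hS.2, List.getLast?_cons_cons]

-- inserting into the stable descending order changes the first fitting club exactly as B's best update does
lemma pv_insert_find (x : String × Int) (S : List (String × Int)) (thr : Int)
    (hS : S.Pairwise (fun a b => b.2 ≤ a.2)) :
    (PySem.List.insertBy (fun a b => decide (b.2 < a.2)) x S).find? (fun p => p.2 ≤ thr) =
      (if x.2 ≤ thr then
        match S.find? (fun p => p.2 ≤ thr) with
        | none => some x
        | some b => if b.2 < x.2 then some x else some b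
       else S.find? (fun p => p.2 ≤ thr)) := by
  induction S with
  | nil => simp [PySem.List.insertBy, List.find?]
  | cons y ys ih =>
    rw [List.pairwise_cons] at hS
    by_cases hy : y.2 < x.2
    · have hins : PySem.List.insertBy (fun a b => decide (b.2 < a.2)) x (y :: ys) = x :: y :: ys := by
        simp [PySem.List.insertBy, hy]
      rw [hins]
      by_cases hx : x.2 ≤ thr
      · have h2 : List.find? (fun p => decide (p.2 ≤ thr)) (x :: y :: ys) = some x :=
          List.find?_cons_of_pos (by simpa using hx)
        rw [h2]
        rcases h : (y :: ys).find? (fun p => decide (p.2 ≤ thr)) with _ | ⟨b⟩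
        · simp [h, hx]
        · have hb : b ∈ y :: ys := List.mem_of_find?_eq_some h
          have hblt : b.2 < x.2 := by
            rcases List.mem_cons.mp hb with hh | hh
            · exact hh ▸ hy
            · exact lt_of_le_of_lt (hS.1 b hh) hy
          simp only [h, if_pos hx, if_pos hblt]
      · have h2 : List.find? (fun p => decide (p.2 ≤ thr)) (x :: y :: ys) =
            List.find? (fun p => decide (p.2 ≤ thr)) (y :: ys) :=
          List.find?_cons_of_neg (by simpa using hx)
        rw [h2, if_neg hx]
    · have hxy : x.2 ≤ y.2 := not_lt.mp hy
      have hins : PySem.List.insertBy (fun a b => decide (b.2 < a.2)) x (y :: ys) =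
          y :: PySem.List.insertBy (fun a b => decide (b.2 < a.2)) x ys := by
        simp [PySem.List.insertBy, hy]
      rw [hins]
      by_cases hq : y.2 ≤ thr
      · have h1 : List.find? (fun p => decide (p.2 ≤ thr)) (y :: ys) = some y :=
          List.find?_cons_of_pos (by simpa using hq)
        have h2 : List.find? (fun p => decide (p.2 ≤ thr))
            (y :: PySem.List.insertBy (fun a b => decide (b.2 < a.2)) x ys) = some y :=
          List.find?_cons_of_pos (by simpa using hq)
        rw [h2, h1, if_pos (le_trans hxy hq)]
        simp [hy]
      · have h1 : List.find? (fun p => decide (p.2 ≤ thr)) (y :: ys) =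
            List.find? (fun p => decide (p.2 ≤ thr)) ys :=
          List.find?_cons_of_neg (by simpa using hq)
        have h2 : List.find? (fun p => decide (p.2 ≤ thr))
            (y :: PySem.List.insertBy (fun a b => decide (b.2 < a.2)) x ys) =
            List.find? (fun p => decide (p.2 ≤ thr))
              (PySem.List.insertBy (fun a b => decide (b.2 < a.2)) x ys) :=
          List.find?_cons_of_neg (by simpa using hq)
        rw [h2, h1]
        exact ih hS.2

-- B's single pass computes A's (first fitting club of the sorted list, its last element)
lemma pv_fold_spec (thr : Int) (l : List (String × Int)) :
    l.foldl (pvStep thr) (none, none) =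
      ((PySem.List.sorted l (fun x => x.2) true).find? (fun p => p.2 ≤ thr),
       (PySem.List.sorted l (fun x => x.2) true).getLast?) := by
  induction l using List.reverseRecOn with
  | nil =>
    rw [PySem.List.sorted_rev_eq_foldl_insertBy]
    rfl
  | append_singleton l x ih =>
    have hsorted : PySem.List.sorted (l ++ [x]) (fun p => p.2) true =
        PySem.List.insertBy (fun a b => decide (b.2 < a.2)) x
          (PySem.List.sorted l (fun p => p.2) true) := by
      rw [PySem.List.sorted_rev_eq_foldl_insertBy, List.foldl_append,
          ← PySem.List.sorted_rev_eq_foldl_insertBy]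
      rfl
    rw [List.foldl_append, ih, hsorted,
        pv_insert_find x _ thr (PySem.List.sorted_pairwise_rev l (fun p => p.2)),
        pv_insert_last x _ (PySem.List.sorted_pairwise_rev l (fun p => p.2))]
    rfl

-- ===== VERDICT (by name: the statement is the Claim_ definition above) =====
theorem select_club_spec : Claim_equal_select_club := by
  intro target_yards club_distances bias _
  show select_club target_yards club_distances bias = select_club_alt target_yards club_distances bias
  unfold select_club select_club_alt
  set distances := if club_distances = [] then pvDefaultClubs else club_distances with hdist
  have hne : distances ≠ [] := by
    rw [hdist]; split
    · simp [pvDefaultClubs]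
    · assumption
  have hclubs : PySem.List.sorted distances (fun x => x.2) true ≠ [] := by
    simpa [PySem.List.sorted_eq_nil_iff] using hne
  simp only [if_neg hclubs]
  rw [pv_fold_spec]
  set thr := target_yards + (if bias = "conservative" then (5:Int) else if bias = "aggressive" then (-5) else 0) + 8 with hthr
  set S := PySem.List.sorted distances (fun x => x.2) true with hS
  rcases hfind : S.find? (fun p => p.2 ≤ thr) with _ | ⟨p⟩
  · rcases hlastq : S.getLast? with _ | ⟨f⟩
    · exact absurd (List.getLast?_eq_none_iff.mp hlastq) hclubs
    · simp only [hfind]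
      rw [PySem.List.pyGetD_neg_one S ("7iron", 160) hclubs]
      exact List.getLast_of_mem_getLast? hlastq
  · simp only [hfind]
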